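-- pv_equiv track=rewrite | github.com/sumant1122/prism | backend/app/ingestion/connectors.py | _extract_readme_excerpt
-- ===== SOURCE A (Python) =====
-- def _extract_readme_excerpt(markdown: str) -> str:
--     if not markdown.strip():
--         return ""
--     lines = []
--     for raw_line in markdown.splitlines():
--         line = raw_line.strip()
--         if not line:
--             if lines:
--                 break
--             continue
--         if line.startswith("#") and not lines:
--             continue
--         lines.append(line)
--         if len(" ".join(lines)) >= 600:
--             break
--     return " ".join(lines)[:1200]
-- ===== SOURCE B (Python) =====
-- def _extract_readme_excerpt(markdown: str) -> str:
--     if not markdown.strip():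
--         return ""
--     stripped = [line.strip() for line in markdown.splitlines()]
--     # drop the leading run of blank or heading lines
--     while stripped and (not stripped[0] or stripped[0].startswith("#")):
--         stripped.pop(0)
--     # take the contiguous non-empty block, stopping once the join reaches 600
--     result = []
--     for line in stripped:
--         if not line:
--             break
--         result.append(line)
--         if len(" ".join(result)) >= 600:
--             break
--     return " ".join(result)[:1200]
-- ===== Notes on version B (the rewrite author's own statement) =====
-- stated objective: simpler
-- what changed: A's single loop with flag-like state ('if lines' deciding whether a blank/heading line is skipped or ends the excerpt) is decomposed into three plain phases: strip all lines, drop the leading run of blank/heading lines, then collect the contiguous non-empty block until the joined length reaches 600.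
import Mathlib
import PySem

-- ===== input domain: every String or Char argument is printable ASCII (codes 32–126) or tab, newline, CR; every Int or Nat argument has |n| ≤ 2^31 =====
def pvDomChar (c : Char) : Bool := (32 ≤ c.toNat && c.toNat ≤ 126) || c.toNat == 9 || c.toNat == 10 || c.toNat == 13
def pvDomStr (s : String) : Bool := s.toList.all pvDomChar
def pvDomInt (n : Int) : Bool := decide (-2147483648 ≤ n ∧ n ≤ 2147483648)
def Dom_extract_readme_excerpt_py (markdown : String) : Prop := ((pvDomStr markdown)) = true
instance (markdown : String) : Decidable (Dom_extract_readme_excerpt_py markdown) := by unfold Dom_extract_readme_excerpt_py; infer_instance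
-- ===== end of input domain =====

-- B replaces A's one loop with flag-like state ('if lines') by a simpler two-phase
-- decomposition: strip all lines, drop the leading blank/heading run, then collect the
-- following block (objective: simpler; same cost).

-- ===== PORT A =====
-- A's single for-loop: state is the accumulated `lines`; branches in A's order.
def pvALoop : List String → List String → List String
  | [], lines => lines
  | raw :: rest, lines =>
    let line := PySem.Str.strip raw
    if line = "" then
      if lines ≠ [] then lines else pvALoop rest lines
    else if PySem.Str.startswith line "#" && decide (lines = []) then
      pvALoop rest lines
    else
      let lines' := lines ++ [line]
      if 600 ≤ PySem.Str.len (PySem.Str.join " " lines') then lines'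
      else pvALoop rest lines'

def extract_readme_excerpt_py (markdown : String) : String :=
  if PySem.Str.strip markdown = "" then ""
  else PySem.Str.slice (PySem.Str.join " " (pvALoop (PySem.Str.splitlines markdown) [])) none (some 1200)

-- ===== PORT B =====
-- B's `while … pop(0)` loop dropping the leading blank/heading run.
def pvBDrop : List String → List String
  | [] => []
  | l :: rest => if l = "" || PySem.Str.startswith l "#" then pvBDrop rest else l :: rest

-- B's `for` loop over the remaining lines: break on blank, append, break at 600.
def pvBTake : List String → List String → List String
  | [], result => result
  | l :: rest, result =>
    if l = "" then result
    else
      let result' := result ++ [l]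
      if 600 ≤ PySem.Str.len (PySem.Str.join " " result') then result'
      else pvBTake rest result'

def extract_readme_excerpt_py_alt (markdown : String) : String :=
  if PySem.Str.strip markdown = "" then ""
  else
    let stripped := (PySem.Str.splitlines markdown).map PySem.Str.strip
    PySem.Str.slice (PySem.Str.join " " (pvBTake (pvBDrop stripped) [])) none (some 1200)

-- ===== PRECONDITION & SPEC =====
def Spec_extract_readme_excerpt_py (markdown : String) (out : String) : Prop := out = extract_readme_excerpt_py_alt markdown
instance (markdown : String) (out : String) : Decidable (Spec_extract_readme_excerpt_py markdown out) := by unfold Spec_extract_readme_excerpt_py; infer_instance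

-- ===== CLAIM (what is proved, stated in full; the proofs are below) =====
def Claim_equal_extract_readme_excerpt_py : Prop := ∀ (markdown : String), Dom_extract_readme_excerpt_py markdown → Spec_extract_readme_excerpt_py markdown (extract_readme_excerpt_py markdown)

-- ===== LEMMAS AND PROOFS =====

-- Phase 2: once `lines` is non-empty, A's loop collects exactly as B's take-loop
-- (the heading branch can no longer fire, and a blank line ends both loops).
theorem pvALoop_eq_take (ls : List String) : ∀ acc : List String, acc ≠ [] →
    pvALoop ls acc = pvBTake (ls.map PySem.Str.strip) acc := by
  induction ls with
  | nil => intro acc _; rfl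
  | cons raw rest ih =>
    intro acc hacc
    simp only [pvALoop, pvBTake, List.map_cons]
    by_cases h0 : PySem.Str.strip raw = ""
    · rw [if_pos h0, if_pos h0, if_pos hacc]
    · rw [if_neg h0, if_neg h0,
        if_neg (show ¬((PySem.Str.startswith (PySem.Str.strip raw) "#" && decide (acc = [])) = true) by
          simp [hacc])]
      by_cases h6 : 600 ≤ PySem.Str.len (PySem.Str.join " " (acc ++ [PySem.Str.strip raw]))
      · rw [if_pos h6, if_pos h6]
      · rw [if_neg h6, if_neg h6, ih _ (by simp)]

-- Phase 1: while `lines` is empty, A's skipping of blank/heading lines is B's drop-loop.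
theorem pvALoop_eq_alt (ls : List String) :
    pvALoop ls [] = pvBTake (pvBDrop (ls.map PySem.Str.strip)) [] := by
  induction ls with
  | nil => rfl
  | cons raw rest ih =>
    simp only [pvALoop, pvBDrop, List.map_cons]
    by_cases h0 : PySem.Str.strip raw = ""
    · rw [if_pos h0, if_neg (show ¬(([] : List String) ≠ []) by simp),
        if_pos (show (decide (PySem.Str.strip raw = "") || PySem.Str.startswith (PySem.Str.strip raw) "#") = true by
          simp [h0])]
      exact ih
    · by_cases hh : PySem.Str.startswith (PySem.Str.strip raw) "#" = true
      · rw [if_neg h0,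
          if_pos (show (PySem.Str.startswith (PySem.Str.strip raw) "#" && decide True) = true by
            rw [decide_true, Bool.and_true]; exact hh),
          if_pos (show (decide (PySem.Str.strip raw = "") || PySem.Str.startswith (PySem.Str.strip raw) "#") = true by
            rw [Bool.or_eq_true]; exact Or.inr hh)]
        exact ih
      · rw [if_neg h0,
          if_neg (show ¬((PySem.Str.startswith (PySem.Str.strip raw) "#" && decide True) = true) by
            rw [decide_true, Bool.and_true]; exact hh),
          if_neg (show ¬((decide (PySem.Str.strip raw = "") || PySem.Str.startswith (PySem.Str.strip raw) "#") = true) by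
            rw [Bool.or_eq_true]; exact fun h => h.elim (fun h1 => h0 (of_decide_eq_true h1)) hh)]
        simp only [List.nil_append]
        simp only [pvBTake, List.nil_append]
        rw [if_neg h0]
        by_cases h6 : 600 ≤ PySem.Str.len (PySem.Str.join " " [PySem.Str.strip raw])
        · rw [if_pos h6, if_pos h6]
        · rw [if_neg h6, if_neg h6, pvALoop_eq_take rest [PySem.Str.strip raw] (by simp)]

-- ===== VERDICT (by name: the statement is the Claim_ definition above) =====
theorem extract_readme_excerpt_py_spec : Claim_equal_extract_readme_excerpt_py := by
  intro markdown _
  unfold Spec_extract_readme_excerpt_py extract_readme_excerpt_py extract_readme_excerpt_py_alt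
  rw [pvALoop_eq_alt]
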